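-- pv_equiv track=rewrite | github.com/pypi-data/pypi-mirror-400 | packages/excellm/excellm-1.1.0.tar.gz/excellm-1.1.0/src/excellm/excel_session.py | _normalize_jagged_array
-- ===== SOURCE A (Python) =====
-- from typing import Any, Dict, List, Optional, Tuple
--
-- def _normalize_jagged_array(data: List[List[Any]]) -> List[List[Any]]:
--     """Normalize jagged array to rectangular by padding with empty values."""
--     if not data:
--         return []
--
--     # Find maximum columns in any row
--     max_cols = 0
--     for row in data:
--         if isinstance(row, (list, tuple)):
--             max_cols = max(max_cols, len(row))
--         else:
--             max_cols = max(max_cols, 1)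
--
--     # Pad shorter rows
--     normalized = []
--     for row in data:
--         if isinstance(row, (list, tuple)):
--             current_row = list(row)
--             if len(current_row) < max_cols:
--                 current_row.extend([""] * (max_cols - len(current_row)))
--             normalized.append(current_row)
--         else:
--             # Handle non-list row (shouldn't happen with 2D array input)
--             normalized.append([row] + [""] * (max_cols - 1))
--
--     return normalized
-- ===== SOURCE B (Python) =====
-- def _normalize_jagged_array(data):
--     """Normalize jagged array to rectangular by padding with empty values.
--
--     Online single pass: keep the output rectangular at all times; when a row
--     wider than the current width appears, retro-pad every earlier row.
--     """
--     out = []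
--     width = 0
--     for row in data:
--         r = list(row) if isinstance(row, (list, tuple)) else [row]
--         if len(r) > width:
--             grow = len(r) - width
--             for prev in out:
--                 prev.extend([""] * grow)
--             width = len(r)
--         else:
--             r.extend([""] * (width - len(r)))
--         out.append(r)
--     return out
-- ===== Notes on version B (the rewrite author's own statement) =====
-- stated objective: alternative
-- what changed: B replaces A's two staged passes (first a running-max scan for the width, then a padding pass) with one online pass that maintains an always-rectangular accumulator and its current width, retro-padding all previously emitted rows whenever a wider row arrives, so no max_cols is ever precomputed.
import Mathlib
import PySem

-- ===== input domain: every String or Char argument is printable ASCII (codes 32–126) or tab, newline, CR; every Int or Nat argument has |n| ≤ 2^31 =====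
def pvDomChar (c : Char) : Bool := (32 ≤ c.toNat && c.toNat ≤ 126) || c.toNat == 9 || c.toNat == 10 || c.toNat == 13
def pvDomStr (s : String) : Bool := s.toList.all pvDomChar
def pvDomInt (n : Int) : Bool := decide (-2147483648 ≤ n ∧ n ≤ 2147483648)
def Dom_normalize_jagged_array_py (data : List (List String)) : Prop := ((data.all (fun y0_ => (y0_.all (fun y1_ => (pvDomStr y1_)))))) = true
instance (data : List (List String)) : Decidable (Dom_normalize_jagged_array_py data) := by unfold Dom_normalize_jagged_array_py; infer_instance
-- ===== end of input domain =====

-- B replaces A's two staged passes (max scan, then padding pass) with ONE online pass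
-- maintaining an always-rectangular accumulator, retro-padding earlier rows when a
-- wider row arrives; objective: alternative algorithm, same cost.

-- ===== PORT A =====
def normalize_jagged_array_py (data : List (List String)) : List (List String) :=
  if data = [] then []
  else
    -- rows are List String, so Python's isinstance(row, (list, tuple)) branch is always taken
    let max_cols := data.foldl (fun m row => max m row.length) 0
    data.foldl (fun normalized row =>
      if row.length < max_cols then
        normalized ++ [row ++ List.replicate (max_cols - row.length) ""]
      else
        normalized ++ [row]) []

-- ===== PORT B =====
def normalize_jagged_array_py_alt (data : List (List String)) : List (List String) :=
  (data.foldl (fun st row =>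
    let r := row
    if st.2 < r.length then
      -- wider row: retro-pad every earlier row, widen
      (st.1.map (fun prev => prev ++ List.replicate (r.length - st.2) "") ++ [r], r.length)
    else
      -- pad the new row to the current width
      (st.1 ++ [r ++ List.replicate (st.2 - r.length) ""], st.2))
    (([] : List (List String)), 0)).1

-- ===== PRECONDITION & SPEC =====
def Spec_normalize_jagged_array_py (data : List (List String)) (out : List (List String)) : Prop := out = normalize_jagged_array_py_alt data
instance (data : List (List String)) (out : List (List String)) : Decidable (Spec_normalize_jagged_array_py data out) := by unfold Spec_normalize_jagged_array_py; infer_instance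

-- ===== CLAIM (what is proved, stated in full; the proofs are below) =====
def Claim_equal_normalize_jagged_array_py : Prop := ∀ (data : List (List String)), Dom_normalize_jagged_array_py data → Spec_normalize_jagged_array_py data (normalize_jagged_array_py data)

-- ===== LEMMAS AND PROOFS =====

-- A's padding loop is a map padding each row to M
theorem pad_foldl (M : Nat) (data : List (List String)) (acc : List (List String)) :
    data.foldl (fun normalized row =>
      if row.length < M then
        normalized ++ [row ++ List.replicate (M - row.length) ""]
      else
        normalized ++ [row]) acc
    = acc ++ data.map (fun r => r ++ List.replicate (M - r.length) "") := by
  induction data generalizing acc with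
  | nil => simp
  | cons x xs ih =>
    simp only [List.foldl_cons, List.map_cons, ih]
    by_cases h : x.length < M
    · simp [h]
    · have : M - x.length = 0 := by omega
      simp [h, this]

-- a foldl-max starting value is ≤ the fold result
theorem le_foldl_max_of_le {a : Nat} {b : Nat} {l : List (List String)}
    (h : a ≤ b) : a ≤ l.foldl (fun m row => max m row.length) b := by
  induction l generalizing b with
  | nil => simpa using h
  | cons x xs ih => exact ih (le_trans h (Nat.le_max_left _ _))

-- B's online fold, from any rectangular state of width w, yields the rows padded to the
-- final width F = max of w and all row lengths.
theorem alt_foldl (data : List (List String)) (out : List (List String)) (w : Nat)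
    (hout : ∀ r ∈ out, r.length = w) :
    (data.foldl (fun st row =>
      let r := row
      if st.2 < r.length then
        (st.1.map (fun prev => prev ++ List.replicate (r.length - st.2) "") ++ [r], r.length)
      else
        (st.1 ++ [r ++ List.replicate (st.2 - r.length) ""], st.2)) (out, w))
    = (out.map (fun r => r ++ List.replicate (data.foldl (fun m row => max m row.length) w - w) "")
        ++ data.map (fun r => r ++ List.replicate (data.foldl (fun m row => max m row.length) w - r.length) ""),
       data.foldl (fun m row => max m row.length) w) := by
  induction data generalizing out w with
  | nil =>
    simp
  | cons x xs ih =>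
    simp only [List.foldl_cons, List.map_cons]
    by_cases h : w < x.length
    · simp only [if_pos h]
      rw [ih (out.map (fun prev => prev ++ List.replicate (x.length - w) "") ++ [x]) x.length
        (by
          intro r hr
          rcases List.mem_append.mp hr with hr | hr
          · obtain ⟨p, hp, rfl⟩ := List.mem_map.mp hr
            simp [hout p hp]; omega
          · simp at hr; subst hr; rfl)]
      have hmax : max w x.length = x.length := by omega
      have hF : x.length ≤ xs.foldl (fun m row => max m row.length) x.length :=
        le_foldl_max_of_le (le_refl x.length)
      rw [hmax]
      simp only [Prod.mk.injEq]
      refine ⟨?_, trivial⟩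
      rw [List.map_append, List.map_map, List.append_assoc]
      congr 1
      case _ =>
        apply List.map_congr_left
        intro r hr
        simp only [Function.comp_apply, List.append_assoc, List.replicate_append_replicate]
        have := hout r hr
        congr 2
        omega
    · simp only [if_neg h]
      rw [ih (out ++ [x ++ List.replicate (w - x.length) ""]) w
        (by
          intro r hr
          rcases List.mem_append.mp hr with hr | hr
          · exact hout r hr
          · simp at hr; subst hr; simp; omega)]
      have hmax : max w x.length = w := by omega
      have hF : w ≤ xs.foldl (fun m row => max m row.length) w :=
        le_foldl_max_of_le (le_refl w)
      rw [hmax]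
      simp only [Prod.mk.injEq]
      refine ⟨?_, trivial⟩
      rw [List.map_append, List.append_assoc]
      congr 1
      case _ =>
        simp only [List.map_cons, List.map_nil, List.singleton_append, List.append_assoc,
          List.replicate_append_replicate]
        congr 3
        omega

-- ===== VERDICT (by name: the statement is the Claim_ definition above) =====
theorem normalize_jagged_array_py_spec : Claim_equal_normalize_jagged_array_py := by
  intro data _
  unfold Spec_normalize_jagged_array_py normalize_jagged_array_py normalize_jagged_array_py_alt
  by_cases h : data = []
  · simp [h]
  · rw [if_neg h, alt_foldl data [] 0 (by simp)]
    simp [pad_foldl]
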